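-- pv_equiv track=rewrite | github.com/tgrishanina/codewars | pirate_island.py | conquer_island
-- ===== SOURCE A (Python) =====
-- def conquer_island(sea_map):
--     coordinates = {"u":[],"m":[]}
--     for index, value in enumerate(sea_map):
--         for i, j in enumerate(value):
--             if j in coordinates.keys():
--                 coordinates[j].append([index,i])
--
--     def coordinate_sum(coord):
--         return sum(coord)
--
--     if coordinates['u']:
--         min_sum_u = min(map(coordinate_sum, coordinates['u']))
--         return [tuple(i) for i in coordinates['u'] if coordinate_sum(i) == min_sum_u]
--     elif coordinates['m']:
--         min_sum_m = min(map(coordinate_sum, coordinates['m']))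
--         return [tuple(i) for i in coordinates['m'] if coordinate_sum(i) == min_sum_m]
--     return []
-- ===== SOURCE B (Python) =====
-- def _take(best_sum, best_pos, r, c):
--     s = r + c
--     if best_sum is None or s < best_sum:
--         return s, [(r, c)]
--     if s == best_sum:
--         best_pos = best_pos + [(r, c)]
--     return best_sum, best_pos
--
--
-- def conquer_island(sea_map):
--     u_sum, u_best = None, []
--     m_sum, m_best = None, []
--     for r, row in enumerate(sea_map):
--         for c, cell in enumerate(row):
--             if cell == "u":
--                 u_sum, u_best = _take(u_sum, u_best, r, c)
--             elif cell == "m":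
--                 m_sum, m_best = _take(m_sum, m_best, r, c)
--     if u_best:
--         return u_best
--     if m_best:
--         return m_best
--     return []
-- ===== Notes on version B (the rewrite author's own statement) =====
-- stated objective: alternative
-- what changed: B replaces A's collect-all-positions-then-min()-then-filter pipeline by a single pass that maintains, for 'u' and for 'm' separately, the best coordinate sum and the list of positions achieving it, resetting on a strictly smaller sum and appending on ties.
import Mathlib
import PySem

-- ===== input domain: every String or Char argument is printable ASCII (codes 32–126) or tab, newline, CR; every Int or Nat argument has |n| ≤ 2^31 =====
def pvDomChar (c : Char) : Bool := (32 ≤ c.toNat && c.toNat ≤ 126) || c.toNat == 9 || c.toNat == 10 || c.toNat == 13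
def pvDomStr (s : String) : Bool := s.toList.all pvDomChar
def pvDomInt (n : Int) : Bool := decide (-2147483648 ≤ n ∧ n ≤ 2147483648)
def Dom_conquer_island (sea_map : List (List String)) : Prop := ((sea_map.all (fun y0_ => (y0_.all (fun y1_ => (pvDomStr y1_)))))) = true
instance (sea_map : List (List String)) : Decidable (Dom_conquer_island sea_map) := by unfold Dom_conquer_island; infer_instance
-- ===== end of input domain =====

-- B replaces A's collect-then-min()-then-filter pipeline by one pass keeping, per letter, the best coordinate sum and its positions (objective: alternative, same cost).

-- ===== PORT A =====
-- A collects all 'u' and 'm' positions, then takes min of coordinate sums and filters.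
def conquer_island (sea_map : List (List String)) : List (Int × Int) :=
  let coords :=
    (PySem.List.enumerate sea_map).foldl (fun acc p =>
      (PySem.List.enumerate p.2).foldl (fun acc2 q =>
        if q.2 = "u" then (acc2.1 ++ [(p.1, q.1)], acc2.2)
        else if q.2 = "m" then (acc2.1, acc2.2 ++ [(p.1, q.1)])
        else acc2) acc) (([], []) : List (Int × Int) × List (Int × Int))
  if coords.1 ≠ [] then
    match PySem.List.min? (coords.1.map (fun c => c.1 + c.2)) (fun x => x) with
    | some m => coords.1.filter (fun c => c.1 + c.2 = m)   -- tuple(i) is the identity on pairs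
    | none => []
  else if coords.2 ≠ [] then
    match PySem.List.min? (coords.2.map (fun c => c.1 + c.2)) (fun x => x) with
    | some m => coords.2.filter (fun c => c.1 + c.2 = m)
    | none => []
  else []

-- ===== PORT B =====
-- _take from Source B: fold one position into the (best sum, best positions) tracker
def pvTake (st : Option Int × List (Int × Int)) (p : Int × Int) : Option Int × List (Int × Int) :=
  match st.1 with
  | none => (some (p.1 + p.2), [p])
  | some m =>
    if p.1 + p.2 < m then (some (p.1 + p.2), [p])
    else if p.1 + p.2 = m then (some m, st.2 ++ [p])
    else (some m, st.2)

def conquer_island_alt (sea_map : List (List String)) : List (Int × Int) :=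
  let st :=
    (PySem.List.enumerate sea_map).foldl (fun st p =>
      (PySem.List.enumerate p.2).foldl (fun st2 q =>
        if q.2 = "u" then (pvTake st2.1 (p.1, q.1), st2.2)
        else if q.2 = "m" then (st2.1, pvTake st2.2 (p.1, q.1))
        else st2) st)
      (((none, []), (none, [])) : (Option Int × List (Int × Int)) × (Option Int × List (Int × Int)))
  if st.1.2 ≠ [] then st.1.2
  else if st.2.2 ≠ [] then st.2.2
  else []

-- ===== PRECONDITION & SPEC =====
def Spec_conquer_island (sea_map : List (List String)) (out : List (Int × Int)) : Prop := out = conquer_island_alt sea_map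
instance (sea_map : List (List String)) (out : List (Int × Int)) : Decidable (Spec_conquer_island sea_map out) := by unfold Spec_conquer_island; infer_instance

-- ===== CLAIM (what is proved, stated in full; the proofs are below) =====
def Claim_equal_conquer_island : Prop := ∀ (sea_map : List (List String)), Dom_conquer_island sea_map → Spec_conquer_island sea_map (conquer_island sea_map)

-- ===== LEMMAS AND PROOFS =====

-- running B's tracker over a whole list of positions
def pvRun (ps : List (Int × Int)) : Option Int × List (Int × Int) :=
  ps.foldl pvTake (none, [])

lemma pvRun_append_singleton (ps : List (Int × Int)) (p : Int × Int) :
    pvRun (ps ++ [p]) = pvTake (pvRun ps) p := by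
  simp [pvRun, List.foldl_append]

-- the tracker state is exactly (min of coordinate sums, positions achieving it)
lemma pvRun_char (ps : List (Int × Int)) :
    pvRun ps = match PySem.List.min? (ps.map (fun c => c.1 + c.2)) (fun x => x) with
      | some m => (some m, ps.filter (fun c => c.1 + c.2 = m))
      | none => (none, []) := by
  induction ps using List.reverseRecOn with
  | nil => rfl
  | append_singleton ps p ih =>
    rw [pvRun_append_singleton, ih]
    match ps with
    | [] =>
      have h0 : PySem.List.min? ([] : List Int) (fun x => x) = none :=
        (PySem.List.min?_eq_none_iff _ _).mpr rfl
      simp [h0, PySem.List.min?_id_cons, pvTake]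
    | x :: t =>
      have h1 : PySem.List.min? ((x :: t).map (fun c => c.1 + c.2)) (fun x => x)
          = some ((t.map (fun c => c.1 + c.2)).foldl min (x.1 + x.2)) := by
        simp [PySem.List.min?_id_cons]
      have h2 : PySem.List.min? (((x :: t) ++ [p]).map (fun c => c.1 + c.2)) (fun x => x)
          = some (min ((t.map (fun c => c.1 + c.2)).foldl min (x.1 + x.2)) (p.1 + p.2)) := by
        simp [PySem.List.min?_id_cons, List.foldl_append]
      set m := (t.map (fun c => c.1 + c.2)).foldl min (x.1 + x.2) with hm
      have hmin : ∀ y ∈ (x :: t).map (fun c => c.1 + c.2), m ≤ y :=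
        fun y hy => PySem.List.min?_isMin h1 y hy
      have hsplit : ∀ f : (Int × Int) → Bool,
          List.filter f (x :: (t ++ [p])) = List.filter f (x :: t) ++ List.filter f [p] := by
        intro f; rw [← List.cons_append, List.filter_append]
      rw [h1, h2]
      by_cases hlt : p.1 + p.2 < m
      · have hfil : (x :: t).filter (fun c => decide (c.1 + c.2 = p.1 + p.2)) = [] := by
          refine List.filter_eq_nil_iff.mpr ?_
          intro c hc
          have := hmin (c.1 + c.2) (List.mem_map.mpr ⟨c, hc, rfl⟩)
          simp only [decide_eq_true_eq]
          omega
        simp [pvTake, hlt, min_eq_right (le_of_lt hlt), hsplit, hfil]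
      · by_cases heq : p.1 + p.2 = m
        · simp [pvTake, heq, hsplit]
        · have hgt : m < p.1 + p.2 := by omega
          simp [pvTake, hlt, heq, min_eq_left (le_of_lt hgt), hsplit]

-- generic fold simulation
lemma foldl_sim {α β γ : Type} (f : α → γ → α) (g : β → γ → β) (h : α → β)
    (hc : ∀ a x, g (h a) x = h (f a x)) (l : List γ) (a : α) :
    l.foldl g (h a) = h (l.foldl f a) := by
  induction l generalizing a with
  | nil => rfl
  | cons x t ih => simp only [List.foldl_cons, hc]; exact ih _

-- the final selection agrees
lemma select_eq (us ms : List (Int × Int)) :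
    (if us ≠ [] then
      match PySem.List.min? (us.map (fun c => c.1 + c.2)) (fun x => x) with
      | some m => us.filter (fun c => c.1 + c.2 = m)
      | none => []
    else if ms ≠ [] then
      match PySem.List.min? (ms.map (fun c => c.1 + c.2)) (fun x => x) with
      | some m => ms.filter (fun c => c.1 + c.2 = m)
      | none => []
    else []) =
    (if (pvRun us).2 ≠ [] then (pvRun us).2
     else if (pvRun ms).2 ≠ [] then (pvRun ms).2
     else []) := by
  have branch : ∀ ps : List (Int × Int), ps ≠ [] →
      ∃ m, PySem.List.min? (ps.map (fun c => c.1 + c.2)) (fun x => x) = some m ∧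
        pvRun ps = (some m, ps.filter (fun c => c.1 + c.2 = m)) ∧
        ps.filter (fun c => decide (c.1 + c.2 = m)) ≠ [] := by
    intro ps hps
    cases h : PySem.List.min? (ps.map (fun c => c.1 + c.2)) (fun x => x) with
    | none =>
      exact absurd (List.map_eq_nil_iff.mp ((PySem.List.min?_eq_none_iff _ _).mp h)) hps
    | some m =>
      refine ⟨m, rfl, ?_, ?_⟩
      · rw [pvRun_char, h]
      · have hmem := PySem.List.min?_mem h
        obtain ⟨c, hc, hcm⟩ := List.mem_map.mp hmem
        intro hnil
        have : c ∈ ps.filter (fun c => decide (c.1 + c.2 = m)) :=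
          List.mem_filter.mpr ⟨hc, by simp [hcm]⟩
        simp [hnil] at this
  by_cases hu : us = []
  · subst hu
    by_cases hmn : ms = []
    · subst hmn; rfl
    · obtain ⟨m, h1, h2, h3⟩ := branch ms hmn
      simp [show pvRun ([] : List (Int × Int)) = (none, []) from rfl, h1, h2, h3, hmn]
  · obtain ⟨m, h1, h2, h3⟩ := branch us hu
    simp [hu, h1, h2, h3]

-- ===== VERDICT (by name: the statement is the Claim_ definition above) =====
theorem conquer_island_spec : Claim_equal_conquer_island := by
  intro sea_map _
  unfold Spec_conquer_island conquer_island conquer_island_alt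
  have key : (PySem.List.enumerate sea_map).foldl (fun st p =>
      (PySem.List.enumerate p.2).foldl (fun st2 q =>
        if q.2 = "u" then (pvTake st2.1 (p.1, q.1), st2.2)
        else if q.2 = "m" then (st2.1, pvTake st2.2 (p.1, q.1))
        else st2) st)
      ((fun a : List (Int × Int) × List (Int × Int) => (pvRun a.1, pvRun a.2)) ([], [])) =
      (fun a : List (Int × Int) × List (Int × Int) => (pvRun a.1, pvRun a.2))
      ((PySem.List.enumerate sea_map).foldl (fun acc p =>
        (PySem.List.enumerate p.2).foldl (fun acc2 q =>
          if q.2 = "u" then (acc2.1 ++ [(p.1, q.1)], acc2.2)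
          else if q.2 = "m" then (acc2.1, acc2.2 ++ [(p.1, q.1)])
          else acc2) acc) ([], [])) := by
    refine foldl_sim _ _ (fun a : List (Int × Int) × List (Int × Int) => (pvRun a.1, pvRun a.2)) ?_ _ ([], [])
    intro a p
    refine foldl_sim _ _ (fun a : List (Int × Int) × List (Int × Int) => (pvRun a.1, pvRun a.2)) ?_ _ a
    intro a2 q
    by_cases h1 : q.2 = "u"
    · simp [h1, pvRun_append_singleton]
    · by_cases h2 : q.2 = "m"
      · simp [h2, pvRun_append_singleton]
      · simp [h1, h2]
  have key' : (PySem.List.enumerate sea_map).foldl (fun st p =>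
      (PySem.List.enumerate p.2).foldl (fun st2 q =>
        if q.2 = "u" then (pvTake st2.1 (p.1, q.1), st2.2)
        else if q.2 = "m" then (st2.1, pvTake st2.2 (p.1, q.1))
        else st2) st)
      (((none, []), (none, [])) : (Option Int × List (Int × Int)) × (Option Int × List (Int × Int))) =
      (pvRun ((PySem.List.enumerate sea_map).foldl (fun acc p =>
        (PySem.List.enumerate p.2).foldl (fun acc2 q =>
          if q.2 = "u" then (acc2.1 ++ [(p.1, q.1)], acc2.2)
          else if q.2 = "m" then (acc2.1, acc2.2 ++ [(p.1, q.1)])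
          else acc2) acc) ([], [])).1,
       pvRun ((PySem.List.enumerate sea_map).foldl (fun acc p =>
        (PySem.List.enumerate p.2).foldl (fun acc2 q =>
          if q.2 = "u" then (acc2.1 ++ [(p.1, q.1)], acc2.2)
          else if q.2 = "m" then (acc2.1, acc2.2 ++ [(p.1, q.1)])
          else acc2) acc) ([], [])).2) := key
  simp only [key']
  exact select_eq _ _
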